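-- pv_equiv track=rewrite | github.com/gccurtis/SymbolicEngine | abstractalgebra_take1.py | scale_term_pair
-- ===== SOURCE A (Python) =====
-- def string_groupby(string, fun):
--     if string == "":
--         return [""]
--     return_list = []
--     prev = fun(string[0])
--     current_word = ""
--     for char in string:
--         val = fun(char)
--         if val == prev:
--             current_word += char
--         else:
--             prev = val
--             return_list.append(current_word)
--             current_word = char
--     return_list.append(current_word)
--     return return_list
--
-- def string_isnumeric(word):
--     return word.isnumeric() or (len(word) > 1 and word[0] == "-" and word[1:].isnumeric())
--
-- def scale_term_pair(scalar, term_pair):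
--     return_terms = []
--     for term1 in term_pair[0]:
--         for term2 in scalar:
--             scalar_vars = ""
--             num = 1
--             isnumeric = lambda x: (x.isnumeric() or x=="-")
--             for word in string_groupby(term1, isnumeric) + string_groupby(term2, isnumeric):
--                 if string_isnumeric(word):
--                     num *= int(word)
--
--                 else:
--                     scalar_vars += word
--             return_terms.append(str(num) + scalar_vars)
--     return [return_terms, term_pair[1]]
-- ===== SOURCE B (Python) =====
-- def _numchar(c):
--     return c.isnumeric() or c == "-"
--
-- def _numword(w):
--     return w.isnumeric() or (len(w) > 1 and w[0] == "-" and w[1:].isnumeric())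
--
-- def _parse(term):
--     """One left-to-right run scan: split term into maximal runs of
--     numeric-ish chars (digits or '-') vs other chars, multiplying the
--     runs that are integers into num and concatenating the rest."""
--     num = 1
--     var = ""
--     i = 0
--     n = len(term)
--     while i < n:
--         j = i + 1
--         while j < n and _numchar(term[j]) == _numchar(term[i]):
--             j += 1
--         w = term[i:j]
--         if _numword(w):
--             num *= int(w)
--         else:
--             var += w
--         i = j
--     return (num, var)
--
-- def scale_term_pair(scalar, term_pair):
--     parsed1 = [_parse(t) for t in term_pair[0]]
--     parsed2 = [_parse(t) for t in scalar]
--     terms = [str(n1 * n2) + v1 + v2 for (n1, v1) in parsed1 for (n2, v2) in parsed2]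
--     return [terms, term_pair[1]]
-- ===== Notes on version B (the rewrite author's own statement) =====
-- stated objective: faster
-- what changed: B parses every term of term_pair[0] and of scalar exactly once into a (num, vars) pair via a direct index-based run scan, then emits the cross product str(n1*n2)+v1+v2, instead of A's re-running string_groupby and re-merging the concatenated group lists inside every inner iteration.
import Mathlib
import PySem

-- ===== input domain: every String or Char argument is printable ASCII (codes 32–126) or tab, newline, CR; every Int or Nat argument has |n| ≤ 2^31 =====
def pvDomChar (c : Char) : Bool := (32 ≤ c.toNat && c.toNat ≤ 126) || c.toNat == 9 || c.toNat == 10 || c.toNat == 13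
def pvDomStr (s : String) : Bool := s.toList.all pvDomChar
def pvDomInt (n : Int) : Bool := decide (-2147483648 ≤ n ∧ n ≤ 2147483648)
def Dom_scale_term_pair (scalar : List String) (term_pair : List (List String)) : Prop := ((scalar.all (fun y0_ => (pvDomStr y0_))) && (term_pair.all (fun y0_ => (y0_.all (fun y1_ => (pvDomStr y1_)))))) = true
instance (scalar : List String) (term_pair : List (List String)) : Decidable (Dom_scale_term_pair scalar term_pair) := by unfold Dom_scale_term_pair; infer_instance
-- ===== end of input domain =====

-- B precomputes one (num, vars) parse per term by a direct run scan, then does the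
-- cross product over the parsed lists — instead of A's re-parsing and re-merging the
-- strings inside every inner iteration (objective: faster by a constant mechanism).

-- ===== PORT A =====
-- the lambda 'x.isnumeric() or x=="-"' (on ASCII, isnumeric of a single char = isdigit)
def pvIsnum (c : Char) : Bool := PySem.Chars.isdigit c || c == '-'

-- word.isnumeric() on ASCII strings = strIsdigit (nonempty, all digits)
def pvStringIsnumeric (w : List Char) : Bool :=
  PySem.Chars.strIsdigit w || (decide (w.length > 1) && decide (PySem.List.pyGetD w 0 ' ' = '-') && PySem.Chars.strIsdigit (w.drop 1))

-- string_groupby's loop: state (prev, current_word, return_list), strings as List Char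
def pvGroupGo (f : Char → Bool) : List Char → Bool → List Char → List (List Char) → List (List Char)
  | [], _, cur, acc => acc ++ [cur]
  | c :: rest, prev, cur, acc =>
      if f c == prev then pvGroupGo f rest prev (cur ++ [c]) acc
      else pvGroupGo f rest (f c) [c] (acc ++ [cur])

def pvStringGroupby (s : List Char) (f : Char → Bool) : List (List Char) :=
  if s = [] then [[]]
  else pvGroupGo f s (f s.head!) [] []

-- the inner word loop: num *= int(word) / scalar_vars += word.
-- int(word) is only taken when pvStringIsnumeric holds, so ofChars? is some; getD 0 is unreachable.
def pvStep (st : Int × List Char) (w : List Char) : Int × List Char :=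
  if pvStringIsnumeric w then (st.1 * (PySem.Int.ofChars? w).getD 0, st.2)
  else (st.1, st.2 ++ w)

def pvEntry (term1 term2 : String) : String :=
  let st := (pvStringGroupby term1.toList pvIsnum ++ pvStringGroupby term2.toList pvIsnum).foldl pvStep (1, [])
  String.mk (PySem.Int.toChars st.1 ++ st.2)

def scale_term_pair (scalar : List String) (term_pair : List (List String)) : List (List String) :=
  -- term_pair[0] / term_pair[1]: IndexError (excluded by Pre_) when absent
  match PySem.List.pyGet? term_pair 0, PySem.List.pyGet? term_pair 1 with
  | some t0, some t1 =>
      let return_terms :=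
        t0.foldl (fun acc term1 =>
          scalar.foldl (fun acc term2 => acc ++ [pvEntry term1 term2]) acc) []
      [return_terms, t1]
  | _, _ => []

-- ===== PORT B =====
-- _numchar(c)
def pvNumchar (c : Char) : Bool := PySem.Chars.isdigit c || c == '-'

-- takeRun: the inner 'while j < n and _numchar(term[j]) == k' scan, taken off the suffix
def pvTakeRun (k : Bool) : List Char → List Char × List Char
  | [] => ([], [])
  | c :: cs => if pvNumchar c == k then
                 let p := pvTakeRun k cs
                 (c :: p.1, p.2)
               else ([], c :: cs)

theorem pvTakeRun_snd_length (k : Bool) (cs : List Char) : (pvTakeRun k cs).2.length ≤ cs.length := by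
  induction cs with
  | nil => simp [pvTakeRun]
  | cons c cs ih => by_cases h : pvNumchar c == k <;> simp [pvTakeRun, h] <;> omega

-- _numword(w)
def pvNumword (w : List Char) : Bool :=
  PySem.Chars.strIsdigit w ||
    (decide (w.length > 1) && decide (PySem.List.pyGetD w 0 ' ' = '-') && PySem.Chars.strIsdigit (w.drop 1))

-- _parse's while loop over the remaining suffix, accumulating (num, var)
def pvParseGo (num : Int) (var : List Char) : List Char → Int × List Char
  | [] => (num, var)
  | c :: cs =>
      let p := pvTakeRun (pvNumchar c) cs
      let w := c :: p.1
      if pvNumword w then pvParseGo (num * (PySem.Int.ofChars? w).getD 0) var p.2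
      else pvParseGo num (var ++ w) p.2
  termination_by t => t.length
  decreasing_by
    all_goals
      have := pvTakeRun_snd_length (pvNumchar c) cs
      simp; omega

def pvParse (t : String) : Int × List Char := pvParseGo 1 [] t.toList

def scale_term_pair_alt (scalar : List String) (term_pair : List (List String)) : List (List String) :=
  match PySem.List.pyGet? term_pair 0 with
  | none => []
  | some t0 =>
    match PySem.List.pyGet? term_pair 1 with
    | none => []
    | some t1 =>
      let parsed1 := t0.map pvParse
      let parsed2 := scalar.map pvParse
      let terms := parsed1.flatMap (fun p1 =>
        parsed2.map (fun p2 => String.mk (PySem.Int.toChars (p1.1 * p2.1) ++ (p1.2 ++ p2.2))))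
      [terms, t1]

-- ===== PRECONDITION & SPEC =====
-- Pre_ excludes exactly the inputs where Python A raises IndexError on term_pair[0]/term_pair[1]
def Pre_scale_term_pair (scalar : List String) (term_pair : List (List String)) : Prop :=
  2 ≤ term_pair.length
instance (scalar : List String) (term_pair : List (List String)) : Decidable (Pre_scale_term_pair scalar term_pair) := by unfold Pre_scale_term_pair; infer_instance

def pvWitness_scale_term_pair : List String × List (List String) :=
  (["2x", "-3"], [["5y", "z-1"], ["done"]])

def Spec_scale_term_pair (scalar : List String) (term_pair : List (List String)) (out : List (List String)) : Prop := out = scale_term_pair_alt scalar term_pair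
instance (scalar : List String) (term_pair : List (List String)) (out : List (List String)) : Decidable (Spec_scale_term_pair scalar term_pair out) := by unfold Spec_scale_term_pair; infer_instance

-- ===== CLAIM (what is proved, stated in full; the proofs are below) =====
def Claim_equal_scale_term_pair : Prop := ∀ (scalar : List String) (term_pair : List (List String)), Dom_scale_term_pair scalar term_pair → Pre_scale_term_pair scalar term_pair → Spec_scale_term_pair scalar term_pair (scale_term_pair scalar term_pair)

-- ===== LEMMAS AND PROOFS =====

-- run decomposition of a string (B's view of the groups)
def pvRuns : List Char → List (List Char)
  | [] => []
  | c :: cs =>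
      let p := pvTakeRun (pvNumchar c) cs
      (c :: p.1) :: pvRuns p.2
  termination_by t => t.length
  decreasing_by
    have := pvTakeRun_snd_length (pvNumchar c) cs
    simp; omega

-- groups still being accumulated with key k and current word cur
def pvConsRuns (k : Bool) (cur : List Char) : List Char → List (List Char)
  | [] => [cur]
  | c :: cs => if pvNumchar c == k then pvConsRuns k (cur ++ [c]) cs
               else cur :: pvConsRuns (pvNumchar c) [c] cs

theorem pvGroupGo_eq_consRuns (cs : List Char) : ∀ (k : Bool) (cur : List Char) (acc : List (List Char)),
    pvGroupGo pvNumchar cs k cur acc = acc ++ pvConsRuns k cur cs := by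
  induction cs with
  | nil => intro k cur acc; simp [pvGroupGo, pvConsRuns]
  | cons c cs ih =>
      intro k cur acc
      by_cases h : pvNumchar c == k <;> simp [pvGroupGo, pvConsRuns, h, ih]

theorem pvConsRuns_eq (cs : List Char) : ∀ (k : Bool) (cur : List Char),
    pvConsRuns k cur cs = (cur ++ (pvTakeRun k cs).1) :: pvRuns (pvTakeRun k cs).2 := by
  induction cs with
  | nil => intro k cur; simp [pvConsRuns, pvTakeRun, pvRuns]
  | cons c cs ih =>
      intro k cur
      by_cases h : pvNumchar c == k
      · simp [pvConsRuns, pvTakeRun, h, ih]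
      · simp [pvConsRuns, pvTakeRun, h, pvRuns, ih]

-- A's lambda and B's _numchar are the same character test
theorem pvIsnum_eq_pvNumchar : pvIsnum = pvNumchar := rfl

-- for nonempty strings, A's groupby produces exactly B's runs
theorem pvGroupby_eq_runs (c : Char) (cs : List Char) :
    pvStringGroupby (c :: cs) pvIsnum = pvRuns (c :: cs) := by
  rw [pvIsnum_eq_pvNumchar]
  simp only [pvStringGroupby, pvRuns]
  rw [if_neg (by simp)]
  simp only [List.head!]
  rw [show pvGroupGo pvNumchar (c :: cs) (pvNumchar c) [] [] =
        pvGroupGo pvNumchar cs (pvNumchar c) [c] [] by simp [pvGroupGo]]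
  rw [pvGroupGo_eq_consRuns, pvConsRuns_eq]
  simp

-- B's parse loop is A's fold over the runs
theorem pvParseGo_eq_foldl (t : List Char) : ∀ (num : Int) (var : List Char),
    pvParseGo num var t = (pvRuns t).foldl pvStep (num, var) := by
  induction t using pvRuns.induct with
  | case1 => intro num var; rw [pvParseGo, pvRuns]; simp
  | case2 c cs p hp =>
      intro num var
      have e : pvNumword = pvStringIsnumeric := rfl
      rw [pvParseGo, pvRuns, e]
      simp only [List.foldl_cons, pvStep]
      by_cases h : pvStringIsnumeric (c :: (pvTakeRun (pvNumchar c) cs).1)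
      · simp only [h, if_pos]; exact hp _ _
      · simp only [h, if_neg, Bool.false_eq_true, not_false_iff]; exact hp _ _

-- the fold's state splits off: running from (n, v) = (n, v) composed with the run from (1, [])
theorem pvFoldl_split (l : List (List Char)) : ∀ (n : Int) (v : List Char),
    l.foldl pvStep (n, v) = (n * (l.foldl pvStep (1, ([] : List Char))).1,
                             v ++ (l.foldl pvStep (1, ([] : List Char))).2) := by
  induction l with
  | nil => intro n v; simp
  | cons w l ih =>
      intro n v
      simp only [List.foldl_cons]
      by_cases h : pvStringIsnumeric w
      · rw [show pvStep (n, v) w = (n * (PySem.Int.ofChars? w).getD 0, v) by simp [pvStep, h],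
            show pvStep (1, ([] : List Char)) w = ((PySem.Int.ofChars? w).getD 0, ([] : List Char)) by simp [pvStep, h]]
        rw [ih, ih ((PySem.Int.ofChars? w).getD 0) []]
        simp [mul_assoc]
      · rw [show pvStep (n, v) w = (n, v ++ w) by simp [pvStep, h],
            show pvStep (1, ([] : List Char)) w = (1, ([] : List Char) ++ w) by simp [pvStep, h]]
        rw [ih, ih 1 (([] : List Char) ++ w)]
        simp

-- fold over one string's groups from (1,[]) = B's parse of that string
theorem pvFold_groupby_eq_parse (t : String) :
    (pvStringGroupby t.toList pvIsnum).foldl pvStep (1, []) = pvParse t := by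
  unfold pvParse
  rw [pvParseGo_eq_foldl]
  cases h : t.toList with
  | nil => simp [pvStringGroupby, pvRuns, pvStep, pvStringIsnumeric, PySem.Chars.strIsdigit]
  | cons c cs => rw [pvGroupby_eq_runs]

-- A's per-pair entry = B's combination of the two precomputed parses
theorem pvEntry_eq (t1 t2 : String) :
    pvEntry t1 t2 = String.mk (PySem.Int.toChars ((pvParse t1).1 * (pvParse t2).1)
                               ++ ((pvParse t1).2 ++ (pvParse t2).2)) := by
  unfold pvEntry
  rw [List.foldl_append, pvFold_groupby_eq_parse]
  have := pvFoldl_split (pvStringGroupby t2.toList pvIsnum) (pvParse t1).1 (pvParse t1).2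
  rw [show ((pvParse t1).1, (pvParse t1).2) = pvParse t1 by rfl] at this
  rw [this, pvFold_groupby_eq_parse]

-- ===== VERDICT (by name: the statement is the Claim_ definition above) =====
theorem scale_term_pair_spec : Claim_equal_scale_term_pair := by
  intro scalar term_pair _ _
  unfold Spec_scale_term_pair scale_term_pair scale_term_pair_alt
  cases h0 : PySem.List.pyGet? term_pair 0 with
  | none => rfl
  | some t0 =>
    cases h1 : PySem.List.pyGet? term_pair 1 with
    | none => rfl
    | some t1 =>
      simp only []
      congr 1
      rw [show (fun (acc : List String) (term1 : String) =>
            scalar.foldl (fun acc term2 => acc ++ [pvEntry term1 term2]) acc) =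
          (fun acc term1 => acc ++ scalar.map (fun term2 => pvEntry term1 term2)) from
        funext fun acc => funext fun term1 => PySem.List.foldl_append_singleton_eq_map ..]
      rw [PySem.List.foldl_append_eq_flatMap]
      simp only [List.flatMap_map, List.nil_append]
      congr 1
      funext term1
      simp only [List.map_map]
      congr 1
      funext term2
      exact pvEntry_eq term1 term2
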